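-- pv_equiv track=rewrite | github.com/Piyush-hacker/GFG_Daily_Solution | Difficulty: Medium/ASCII Range Sum/ascii-range-sum.py | asciirange
-- ===== SOURCE A (Python) =====
-- def asciirange(s: str) -> list:
--     # Step 1: Track first and last index of each character
--     char_range = {}
--     for i, ch in enumerate(s):
--         if ch in char_range:
--             char_range[ch][1] = i
--         else:
--             char_range[ch] = [i, i]
--
--     # Step 2: Prefix sum of ASCII values
--     prefix = [0] * (len(s) + 1)
--     for i in range(len(s)):
--         prefix[i+1] = prefix[i] + ord(s[i])
--
--     # Step 3: Collect ASCII sums between first and last occurrences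
--     result = []
--     for start, end in char_range.values():
--         if end > start + 1:
--             result.append(prefix[end] - prefix[start+1])
--
--     return result
-- ===== SOURCE B (Python) =====
-- def asciirange(s: str) -> list:
--     # For each distinct character (in first-occurrence order), sum the ASCII
--     # values of the text strictly between its first and last occurrence.
--     out = []
--     for c in dict.fromkeys(s):
--         after = s.partition(c)[2]        # text after the first occurrence of c
--         between = after.rpartition(c)[0] # of that, text before the last occurrence of c
--         if between:
--             out.append(sum(map(ord, between)))
--     return out
-- ===== Notes on version B (the rewrite author's own statement) =====
-- stated objective: simpler
-- what changed: Replaces A's index-pair dict plus prefix-sum table with a direct per-character scan: for each distinct character, cut out the text strictly between its first and last occurrence with partition/rpartition and sum its ASCII codes directly.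
import Mathlib
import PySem

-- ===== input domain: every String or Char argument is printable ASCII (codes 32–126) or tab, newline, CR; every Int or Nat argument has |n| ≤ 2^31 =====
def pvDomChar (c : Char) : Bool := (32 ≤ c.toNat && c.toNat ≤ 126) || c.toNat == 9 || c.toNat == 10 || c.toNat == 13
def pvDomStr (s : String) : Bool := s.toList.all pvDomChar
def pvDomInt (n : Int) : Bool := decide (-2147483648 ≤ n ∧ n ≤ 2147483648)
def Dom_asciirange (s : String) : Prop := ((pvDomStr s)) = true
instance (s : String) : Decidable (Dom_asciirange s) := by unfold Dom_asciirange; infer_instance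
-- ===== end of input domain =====

-- B replaces A's index-pair dict + prefix-sum table by direct per-character scans
-- (partition/rpartition around the first/last occurrence, summing that slice); objective: simpler.


-- ===== PORT A =====
def asciirange (s : String) : List Int :=
  let cs := s.toList
  -- Step 1: first/last index of each character (dict in insertion order)
  let charRange : PySem.Dict Char (Int × Int) :=
    (PySem.List.enumerate cs 0).foldl (fun d p =>
      if d.contains p.2 then d.insert p.2 ((d.getD p.2 (0, 0)).1, p.1)
      else d.insert p.2 (p.1, p.1)) PySem.Dict.empty
  -- Step 2: prefix sums of ASCII values
  let n := cs.length
  let pref : List Int :=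
    (PySem.List.pyRange 0 (n : Int) 1).foldl (fun pr i =>
      PySem.List.pySetD pr (i + 1)
        (PySem.List.pyGetD pr i 0 + ((PySem.List.pyGetD cs i ' ').toNat : Int)))
      (List.replicate (n + 1) 0)
  -- Step 3: collect the sums between first and last occurrences
  charRange.values.foldl (fun res p =>
    if p.2 > p.1 + 1 then
      res ++ [PySem.List.pyGetD pref p.2 0 - PySem.List.pyGetD pref (p.1 + 1) 0]
    else res) []

-- ===== PORT B =====
-- hand port of Python's s.partition(c)[2] for a ONE-CHARACTER separator (exact there):
-- everything after the first occurrence of c, [] when c is absent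
def afterFirst : List Char → Char → List Char
  | [], _ => []
  | x :: xs, c => if x = c then xs else afterFirst xs c

-- hand port of Python's t.rpartition(c)[0] for a ONE-CHARACTER separator (exact there):
-- everything before the last occurrence of c, [] when c is absent
def beforeLast (t : List Char) (c : Char) : List Char := (afterFirst t.reverse c).reverse

def asciirange_alt (s : String) : List Int :=
  (PySem.List.dedup s.toList).foldl (fun out c =>
    let between := beforeLast (afterFirst s.toList c) c
    if between ≠ [] then out ++ [(between.map (fun ch => (ch.toNat : Int))).sum]
    else out) []

-- ===== PRECONDITION & SPEC =====
def Spec_asciirange (s : String) (out : List Int) : Prop := out = asciirange_alt s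
instance (s : String) (out : List Int) : Decidable (Spec_asciirange s out) := by unfold Spec_asciirange; infer_instance

-- ===== CLAIM (what is proved, stated in full; the proofs are below) =====
def Claim_equal_asciirange : Prop := ∀ (s : String), Dom_asciirange s → Spec_asciirange s (asciirange s)

-- ===== LEMMAS AND PROOFS =====

-- first-occurrence index (length when absent); last occurrence read off the reverse
def fstN : List Char → Char → Nat
  | [], _ => 0
  | x :: xs, c => if x = c then 0 else fstN xs c + 1

def lstN (cs : List Char) (c : Char) : Nat := cs.length - 1 - fstN cs.reverse c

def ordI (c : Char) : Int := (c.toNat : Int)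

def prefSum (cs : List Char) (k : Nat) : Int := ((cs.take k).map ordI).sum

theorem fstN_of_not_mem (xs : List Char) (c : Char) (h : c ∉ xs) : fstN xs c = xs.length := by
  induction xs with
  | nil => rfl
  | cons x xs ih =>
    simp only [List.mem_cons, not_or] at h
    simp [fstN, Ne.symm h.1, ih h.2]

theorem fstN_lt_length (xs : List Char) (c : Char) (h : c ∈ xs) : fstN xs c < xs.length := by
  induction xs with
  | nil => simp at h
  | cons x xs ih =>
    by_cases hx : x = c
    · simp [fstN, hx]
    · rcases List.mem_cons.mp h with h1 | h2
      · exact absurd h1.symm hx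
      · simpa [fstN, hx] using ih h2

theorem take_fstN_succ (xs : List Char) (c : Char) (h : c ∈ xs) :
    xs.take (fstN xs c + 1) = xs.take (fstN xs c) ++ [c] := by
  induction xs with
  | nil => simp at h
  | cons x xs ih =>
    by_cases hx : x = c
    · simp [fstN, hx]
    · rcases List.mem_cons.mp h with h1 | h2
      · exact absurd h1.symm hx
      · simp [fstN, hx, List.take_succ_cons, ih h2]

theorem fstN_append (xs ys : List Char) (c : Char) :
    fstN (xs ++ ys) c = if c ∈ xs then fstN xs c else xs.length + fstN ys c := by
  induction xs with
  | nil => simp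
  | cons x xs ih =>
    by_cases hx : x = c
    · simp [fstN, hx]
    · simp only [List.cons_append, fstN, hx, if_false, ih, List.mem_cons, List.length_cons]
      by_cases hm : c ∈ xs
      · simp [hm, Ne.symm hx]
      · simp [hm, Ne.symm hx]; omega

theorem afterFirst_eq_drop (xs : List Char) (c : Char) :
    afterFirst xs c = xs.drop (fstN xs c + 1) := by
  induction xs with
  | nil => rfl
  | cons x xs ih =>
    by_cases hx : x = c
    · simp [afterFirst, fstN, hx]
    · simp [afterFirst, fstN, hx, ih]

theorem dedup_append_singleton (xs : List Char) (x : Char) :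
    PySem.List.dedup (xs ++ [x]) =
      if x ∈ xs then PySem.List.dedup xs else PySem.List.dedup xs ++ [x] := by
  simp only [PySem.List.dedup_eq_ofList, PySem.Set.ofList_append_singleton]
  by_cases hm : x ∈ xs
  · rw [PySem.Set.add_of_mem (by rwa [PySem.Set.mem_ofList]), if_pos hm]
  · rw [PySem.Set.add_of_not_mem (by rwa [PySem.Set.mem_ofList]), if_neg hm]

-- Step 1 of A: the dict's items are the distinct chars with their (first, last) index pair
theorem step1_items (cs : List Char) :
    ((PySem.List.enumerate cs 0).foldl (fun d p =>
      if d.contains p.2 then d.insert p.2 ((d.getD p.2 (0, 0)).1, p.1)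
      else d.insert p.2 (p.1, p.1)) PySem.Dict.empty).items
    = (PySem.List.dedup cs).map (fun c => (c, ((fstN cs c : Int), (lstN cs c : Int)))) := by
  induction cs using List.reverseRecOn with
  | nil => simp [PySem.List.enumerate]; rfl
  | append_singleton xs x ih =>
    rw [PySem.List.enumerate_append, List.foldl_append]
    set step := (fun (d : PySem.Dict Char (Int × Int)) (p : Int × Char) =>
      if d.contains p.2 then d.insert p.2 ((d.getD p.2 (0, 0)).1, p.1)
      else d.insert p.2 (p.1, p.1)) with hstep
    set d := (PySem.List.enumerate xs 0).foldl step PySem.Dict.empty with hd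
    have hkeys : d.keys = PySem.List.dedup xs := by
      simp only [PySem.Dict.keys, ih, List.map_map]
      simp [Function.comp_def]
    have hnd : d.keys.Nodup := by rw [hkeys]; exact PySem.List.nodup_dedup xs
    have henum : PySem.List.enumerate [x] (0 + (xs.length : Int)) = [((xs.length : Int), x)] := by
      simp [PySem.List.enumerate_cons]
    rw [henum, List.foldl_cons, List.foldl_nil, hstep]
    have hcont : d.contains x = decide (x ∈ xs) := by
      rw [PySem.Dict.contains_eq_decide_mem_keys, hkeys]
      simp
    by_cases hm : x ∈ xs
    · -- existing key: overwrite in place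
      have hgd : d.getD x (0, 0) = ((fstN xs x : Int), (lstN xs x : Int)) := by
        apply PySem.Dict.getD_of_mem_items d _ hnd
        rw [ih]
        exact List.mem_map_of_mem (by rwa [PySem.List.mem_dedup])
      simp only [hcont, hm, decide_true, if_true, hgd]
      rw [PySem.Dict.items_insert_of_contains _ _ (by simp [hcont, hm]), ih, List.map_map,
        dedup_append_singleton, if_pos hm]
      apply List.map_congr_left
      intro c hc
      have hcxs : c ∈ xs := (PySem.List.mem_dedup xs c).mp hc
      by_cases hcx : c = x
      · subst hcx
        simp only [Function.comp_apply, beq_self_eq_true, if_true]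
        rw [fstN_append, if_pos hcxs]
        have : lstN (xs ++ [c]) c = xs.length := by
          unfold lstN
          simp [fstN]
        simp [this]
      · simp only [Function.comp_apply, beq_iff_eq, hcx, if_false]
        rw [fstN_append, if_pos hcxs]
        have hlt : fstN xs.reverse c < xs.length := by
          have := fstN_lt_length xs.reverse c (by simpa using hcxs)
          simpa using this
        have : lstN (xs ++ [x]) c = lstN xs c := by
          unfold lstN
          simp only [List.reverse_append, List.reverse_cons, List.reverse_nil, List.nil_append,
            List.singleton_append, List.length_append, List.length_singleton]
          have hx_ne : ¬ (x = c) := fun h => hcx h.symm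
          simp only [fstN, hx_ne, if_false]
          omega
        simp [this]
    · -- fresh key: append
      simp only [hcont, hm, decide_false, Bool.false_eq_true, if_false]
      rw [PySem.Dict.items_insert_of_not_contains _ _ (by simp [hcont, hm]), ih,
        dedup_append_singleton, if_neg hm, List.map_append]
      congr 1
      · apply List.map_congr_left
        intro c hc
        have hcxs : c ∈ xs := (PySem.List.mem_dedup xs c).mp hc
        have hcx : c ≠ x := fun h => hm (h ▸ hcxs)
        rw [fstN_append, if_pos hcxs]
        have hlt : fstN xs.reverse c < xs.length := by
          have := fstN_lt_length xs.reverse c (by simpa using hcxs)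
          simpa using this
        have : lstN (xs ++ [x]) c = lstN xs c := by
          unfold lstN
          simp only [List.reverse_append, List.reverse_cons, List.reverse_nil, List.nil_append,
            List.singleton_append, List.length_append, List.length_singleton]
          have hx_ne : ¬ (x = c) := fun h => hcx h.symm
          simp only [fstN, hx_ne, if_false]
          omega
        simp [this]
      · simp only [List.map_singleton]
        rw [fstN_append, if_neg hm]
        have h1 : fstN [x] x = 0 := by simp [fstN]
        have h2 : lstN (xs ++ [x]) x = xs.length := by
          unfold lstN
          simp [fstN]
        simp [h1, h2]

-- Step 1, read off the values list
theorem step1_values (cs : List Char) :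
    ((PySem.List.enumerate cs 0).foldl (fun d p =>
      if d.contains p.2 then d.insert p.2 ((d.getD p.2 (0, 0)).1, p.1)
      else d.insert p.2 (p.1, p.1)) PySem.Dict.empty).values
    = (PySem.List.dedup cs).map (fun c => ((fstN cs c : Int), (lstN cs c : Int))) := by
  have hv : ∀ (d : PySem.Dict Char (Int × Int)), d.values = d.items.map (·.2) := fun _ => rfl
  rw [hv, step1_items, List.map_map]
  simp [Function.comp_def]

-- Step 2 of A: the prefix table holds the sums of ASCII codes of the prefixes
theorem step2_aux (cs : List Char) (j : Nat) (hj : j ≤ cs.length) :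
    ((PySem.List.pyRange 0 (j : Int) 1).foldl (fun pr i =>
      PySem.List.pySetD pr (i + 1)
        (PySem.List.pyGetD pr i 0 + ((PySem.List.pyGetD cs i ' ').toNat : Int)))
      (List.replicate (cs.length + 1) 0))
    = (List.range (j + 1)).map (prefSum cs) ++ List.replicate (cs.length - j) 0 := by
  induction j with
  | zero =>
    have h0 : PySem.List.pyRange 0 (0 : Int) 1 = [] := by decide
    simp [h0, List.replicate_succ, prefSum]
  | succ j ih =>
    have hj' : j ≤ cs.length := by omega
    have hcast : ((j + 1 : Nat) : Int) = (j : Int) + 1 := by push_cast; ring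
    rw [hcast, PySem.List.pyRange_one_succ_right (by positivity), List.foldl_append,
      ih hj', List.foldl_cons, List.foldl_nil]
    have hlen : ((List.range (j + 1)).map (prefSum cs)).length = j + 1 := by simp
    have hget : PySem.List.pyGetD
        ((List.range (j + 1)).map (prefSum cs) ++ List.replicate (cs.length - j) 0) (j : Int) 0
        = prefSum cs j := by
      rw [PySem.List.pyGetD_natCast, List.getD_eq_getElem?_getD,
        List.getElem?_append_left (by omega)]
      simp
    have hcs : PySem.List.pyGetD cs (j : Int) ' ' = cs[j]'(by omega) := by
      rw [PySem.List.pyGetD_natCast, List.getD_eq_getElem?_getD, List.getElem?_eq_getElem (by omega)]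
      rfl
    rw [hget, hcs]
    have hset : ∀ v : Int, PySem.List.pySetD
        ((List.range (j + 1)).map (prefSum cs) ++ List.replicate (cs.length - j) 0) ((j : Int) + 1) v
        = (List.range (j + 1)).map (prefSum cs) ++ (v :: List.replicate (cs.length - j - 1) 0) := by
      intro v
      rw [show ((j : Int) + 1) = ((j + 1 : Nat) : Int) by push_cast; ring, PySem.List.pySetD_natCast,
        List.set_append_right _ _ (by omega), hlen]
      have : cs.length - j = (cs.length - j - 1) + 1 := by omega
      rw [this, List.replicate_succ]
      simp
    rw [hset]
    have hmt : ∀ k, ((cs.take k).map ordI) = (cs.map ordI).take k := by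
      intro k; simp [List.map_take]
    have hv2 : ((List.map ordI cs).take (j + 1)).sum
        = ((List.map ordI cs).take j).sum + ((cs[j]'(by omega)).toNat : Int) := by
      rw [List.take_add_one, List.getElem?_map, List.getElem?_eq_getElem (by omega)]
      simp [ordI]
    have hv : prefSum cs j + ((cs[j]'(by omega)).toNat : Int) = prefSum cs (j + 1) := by
      unfold prefSum
      rw [hmt, hmt, hv2]
    rw [hv]
    conv_rhs => rw [List.range_succ]
    simp
    omega

theorem step2_pref (cs : List Char) :
    ((PySem.List.pyRange 0 (cs.length : Int) 1).foldl (fun pr i =>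
      PySem.List.pySetD pr (i + 1)
        (PySem.List.pyGetD pr i 0 + ((PySem.List.pyGetD cs i ' ').toNat : Int)))
      (List.replicate (cs.length + 1) 0))
    = (List.range (cs.length + 1)).map (prefSum cs) := by
  rw [step2_aux cs cs.length le_rfl]
  simp

theorem filter_map_congr {α β : Type} (l : List α) (p q : α → Bool) (f g : α → β)
    (h : ∀ c ∈ l, p c = q c ∧ (p c = true → f c = g c)) :
    (l.filter p).map f = (l.filter q).map g := by
  induction l with
  | nil => rfl
  | cons x l ih =>
    rcases h x (List.mem_cons_self) with ⟨h1, h2⟩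
    have ih' := ih (fun c hc => h c (List.mem_cons_of_mem x hc))
    simp only [List.filter_cons, ← h1]
    by_cases hp : p x = true
    · simp [hp, h2 hp, ih']
    · have hpf : p x = false := by simpa using hp
      simp [hpf, ih']

-- per-character core: the two conditions agree, and so do the two values
theorem perChar (cs : List Char) (c : Char) (hc : c ∈ cs) :
    (((lstN cs c : Int) > (fstN cs c : Int) + 1) ↔ beforeLast (afterFirst cs c) c ≠ []) ∧
    ((lstN cs c : Int) > (fstN cs c : Int) + 1 →
      prefSum cs (lstN cs c) - prefSum cs (fstN cs c + 1)
        = ((beforeLast (afterFirst cs c) c).map ordI).sum) := by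
  set n := cs.length with hn
  set f := fstN cs c with hfdef
  have hf : f < n := fstN_lt_length cs c hc
  set t := cs.drop (f + 1) with htdef
  have haf : afterFirst cs c = t := afterFirst_eq_drop cs c
  have htlen : t.length = n - (f + 1) := by simp [htdef]; omega
  have hsplit : cs.take (f + 1) ++ t = cs := List.take_append_drop _ _
  have hrev : cs.reverse = t.reverse ++ (cs.take (f + 1)).reverse := by
    conv_lhs => rw [← hsplit]
    rw [List.reverse_append]
  have htkrev : (cs.take (f + 1)).reverse = c :: (cs.take f).reverse := by
    rw [take_fstN_succ cs c hc]
    simp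
    rw [hfdef]
  rw [haf]
  by_cases hm : c ∈ t
  · -- at least two occurrences
    set r := fstN t.reverse c with hrdef
    have hr : r < t.length := by
      have := fstN_lt_length t.reverse c (by simpa using hm)
      simpa using this
    have hfr : fstN cs.reverse c = r := by
      rw [hrev, fstN_append, if_pos (by simpa using hm)]
    have hl : lstN cs c = n - 1 - r := by
      simp [lstN, hfr, hn]
    set m := t.length - (r + 1) with hmdef
    have hbt : beforeLast t c = t.take m := by
      unfold beforeLast
      rw [afterFirst_eq_drop, ← hrdef, List.drop_reverse, List.reverse_reverse]
    have htne : t ≠ [] := by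
      intro h; rw [h] at hr; simp at hr
    have hcast : ((lstN cs c : Int) > (f : Int) + 1) ↔ f + 1 < lstN cs c := by omega
    refine ⟨?_, ?_⟩
    · rw [hbt, hcast, hl, ne_eq, List.take_eq_nil_iff]
      simp only [htne, or_false]
      omega
    intro hgt
    have hlf : f + 1 < lstN cs c := by exact_mod_cast hgt
    have hlm : lstN cs c = (f + 1) + m := by omega
    have hln : lstN cs c ≤ n := by omega
    rw [hbt, hlm]
    unfold prefSum
    rw [List.take_add, ← htdef]
    simp
  · -- exactly one occurrence
    have haf2 : afterFirst t.reverse c = [] := by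
      rw [afterFirst_eq_drop, fstN_of_not_mem _ _ (by simpa using hm)]
      exact List.drop_eq_nil_of_le (by simp)
    have hbt : beforeLast t c = [] := by simp [beforeLast, haf2]
    have hfr : fstN cs.reverse c = t.length := by
      rw [hrev, fstN_append, if_neg (by simpa using hm), htkrev]
      simp [fstN]
    have hl : lstN cs c = f := by
      simp only [lstN, hfr, htlen, ← hn]
      omega
    rw [hbt, hl]
    refine ⟨?_, ?_⟩
    · constructor
      · intro h; exfalso; omega
      · intro h; exact absurd rfl h
    · intro h; exfalso; omega

-- ===== VERDICT (by name: the statement is the Claim_ definition above) =====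
theorem asciirange_spec : Claim_equal_asciirange := by
  unfold Claim_equal_asciirange
  intro s _
  unfold Spec_asciirange
  simp only [asciirange, asciirange_alt]
  rw [step1_values, step2_pref, PySem.List.foldl_append_ite, PySem.List.foldl_append_ite,
    List.filter_map, List.map_map, List.nil_append, List.nil_append]
  set cs := s.toList with hcs
  have hlook : ∀ k : Nat, k ≤ cs.length →
      PySem.List.pyGetD ((List.range (cs.length + 1)).map (prefSum cs)) (k : Int) 0
        = prefSum cs k := by
    intro k hk
    rw [PySem.List.pyGetD_natCast, PySem.List.getD_map_range _ _ _ _ (by omega)]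
  apply filter_map_congr
  intro c hc
  have hcm : c ∈ cs := (PySem.List.mem_dedup cs c).mp hc
  rcases perChar cs c hcm with ⟨hiff, hval⟩
  constructor
  · simp only [Function.comp_apply]
    exact decide_eq_decide.mpr hiff
  · intro hp
    simp only [Function.comp_apply] at hp ⊢
    have hgt : (lstN cs c : Int) > (fstN cs c : Int) + 1 := of_decide_eq_true hp
    have h1 : lstN cs c ≤ cs.length := by unfold lstN; omega
    have h2 : fstN cs c + 1 ≤ cs.length := fstN_lt_length cs c hcm
    rw [show ((fstN cs c : Int) + 1) = ((fstN cs c + 1 : Nat) : Int) by push_cast; ring,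
      hlook _ h1, hlook _ h2, hval hgt]
    rfl
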